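-- pv_equiv track=rewrite | github.com/Saarthi-ai/Sales-And-onboarding-NLU | saarthi_train/postprocessing/time_utils.py | filter_times
-- ===== SOURCE A (Python) =====
-- from typing import Any, List, Tuple
--
-- def filter_times(dates_list: List[Any]):
--     valid_list = []
--     for dates in dates_list:
--         if dates[0] != 'No pattern found' and dates[0] != "Invalid date" and dates[0] != "":
--             valid_list.append(dates)
--     if len(valid_list) == 0:
--         return None, None
--
--     # Initialize minimum date and value
--     min_date = valid_list[0][0]
--     min_value = valid_list[0][1]
--
--     # Loop through the list of tuples
--     for date, value in valid_list:
--         # Update the minimum date and value if necessary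
--         if date < min_date:
--             min_date = date
--             min_value = value
--     return min_date, min_value
-- ===== SOURCE B (Python) =====
-- def filter_times(dates_list):
--     valid = [d for d in dates_list
--              if d[0] != 'No pattern found' and d[0] != 'Invalid date' and d[0] != '']
--     if not valid:
--         return None, None
--     best = sorted(valid, key=lambda d: d[0])[0]
--     return best[0], best[1]
-- ===== Notes on version B (the rewrite author's own statement) =====
-- stated objective: alternative
-- what changed: Replaces A's explicit running-minimum scan (initialize from the first valid entry, update on strict <) with filter + stable sort keyed on the date string and taking the first element; sort stability reproduces A's first-wins tie behaviour.
import Mathlib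
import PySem

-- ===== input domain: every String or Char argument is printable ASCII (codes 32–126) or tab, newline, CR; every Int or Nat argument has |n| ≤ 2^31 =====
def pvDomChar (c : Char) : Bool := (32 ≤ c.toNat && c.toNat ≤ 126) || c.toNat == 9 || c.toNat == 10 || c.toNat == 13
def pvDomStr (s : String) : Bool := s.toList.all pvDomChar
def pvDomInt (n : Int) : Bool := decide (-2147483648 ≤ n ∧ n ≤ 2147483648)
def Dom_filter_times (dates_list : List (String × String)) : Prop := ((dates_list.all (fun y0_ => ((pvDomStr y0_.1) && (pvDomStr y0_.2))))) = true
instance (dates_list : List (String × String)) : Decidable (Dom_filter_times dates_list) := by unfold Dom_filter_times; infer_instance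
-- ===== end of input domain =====

-- ===== PORT A =====
-- B replaces A's running-minimum scan with filter + stable sort on the date key; return values only.
def filter_times (dates_list : List (String × String)) : Option String × Option String :=
  let valid_list : List (String × String) :=
    dates_list.foldl (fun acc dates =>
      if dates.1 != "No pattern found" && dates.1 != "Invalid date" && dates.1 != "" then
        acc ++ [dates]
      else acc) []
  match valid_list with
  | [] => (none, none)
  | v0 :: _ =>
    let r := valid_list.foldl
      (fun (m : String × String) d => if d.1 < m.1 then (d.1, d.2) else m) (v0.1, v0.2)
    (some r.1, some r.2)

-- ===== PORT B =====
def filter_times_alt (dates_list : List (String × String)) : Option String × Option String :=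
  let valid : List (String × String) :=
    dates_list.filter (fun d =>
      d.1 != "No pattern found" && d.1 != "Invalid date" && d.1 != "")
  if valid.isEmpty then (none, none)
  else
    match PySem.List.sorted valid (fun d => d.1) false with
    | [] => (none, none)  -- unreachable: sorted of a nonempty list is nonempty
    | best :: _ => (some best.1, some best.2)

-- ===== PRECONDITION & SPEC =====
def Spec_filter_times (dates_list : List (String × String)) (out : Option String × Option String) : Prop := out = filter_times_alt dates_list
instance (dates_list : List (String × String)) (out : Option String × Option String) : Decidable (Spec_filter_times dates_list out) := by unfold Spec_filter_times; infer_instance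

-- ===== CLAIM (what is proved, stated in full; the proofs are below) =====
def Claim_equal_filter_times : Prop := ∀ (dates_list : List (String × String)), Dom_filter_times dates_list → Spec_filter_times dates_list (filter_times dates_list)

-- ===== LEMMAS AND PROOFS =====

-- head of inserting x into a nonempty list: x wins iff its key is strictly smaller
theorem head?_insertBy (x a : String × String) (ys : List (String × String)) :
    (PySem.List.insertBy (fun p q => decide (p.1 < q.1)) x (a :: ys)).head? =
      some (if x.1 < a.1 then x else a) := by
  simp [PySem.List.insertBy]
  split_ifs <;> simp

-- the head of the insertion-sort fold is A's running minimum (first-wins on ties)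
theorem head?_foldl_insertBy (t : List (String × String)) :
    ∀ (acc : List (String × String)) (m : String × String), acc.head? = some m →
    ((t.foldl (fun acc x => PySem.List.insertBy (fun p q => decide (p.1 < q.1)) x acc) acc).head? =
      some (t.foldl (fun m d => if d.1 < m.1 then d else m) m)) := by
  induction t with
  | nil => intro acc m h; simpa using h
  | cons x t ih =>
    intro acc m h
    cases acc with
    | nil => simp at h
    | cons a ys =>
      simp only [List.head?_cons, Option.some.injEq] at h
      subst h
      simp only [List.foldl_cons]
      exact ih _ _ (head?_insertBy x a ys)

-- ===== VERDICT (by name: the statement is the Claim_ definition above) =====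
theorem filter_times_spec : Claim_equal_filter_times := by
  intro dates_list _
  unfold Spec_filter_times filter_times filter_times_alt
  rw [PySem.List.foldl_append_if_eq_filter]
  simp only [List.nil_append]
  cases hv : dates_list.filter (fun d =>
      d.1 != "No pattern found" && d.1 != "Invalid date" && d.1 != "") with
  | nil => simp
  | cons h t =>
    simp only [List.isEmpty_cons, Bool.false_eq_true, if_false, List.foldl_cons, lt_irrefl,
      if_false]
    have hs : (PySem.List.sorted (h :: t) (fun d => d.1) false).head? =
        some (t.foldl (fun m d => if d.1 < m.1 then d else m) h) := by
      rw [PySem.List.sorted_eq_foldl_insertBy]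
      simp only [List.foldl_cons]
      exact head?_foldl_insertBy t [h] h rfl
    cases hsort : PySem.List.sorted (h :: t) (fun d => d.1) false with
    | nil => simp [hsort] at hs
    | cons b rest =>
      rw [hsort] at hs
      simp only [List.head?_cons, Option.some.injEq] at hs
      subst hs
      rfl
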